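-- pv_equiv track=rewrite | github.com/SnowTempest/Bioshock-2-Multiplayer-Rank-Modifier | rank_modifier.py | add_adam_requirements
-- ===== SOURCE A (Python) =====
-- def add_adam_requirements(current_amount, add_amount, file_content, last_index, last_adam_amount):
--     if last_index != -1:
--         for i in range (current_amount, current_amount + add_amount):
--             last_adam_amount += 1
--             file_content.insert(last_index + 1, f"mRankAdamRequirements={last_adam_amount}\n")
--             last_index += 1
--     else:
--         last_adam_amount = 0
--         for i in range(current_amount, add_amount):
--             last_adam_amount += 1
--             file_content.append( f"\nmRankAdamRequirements={last_adam_amount}")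
--
--     return file_content
-- ===== SOURCE B (Python) =====
-- def add_adam_requirements(current_amount, add_amount, file_content, last_index, last_adam_amount):
--     # Mutates file_content in place, like the original; builds all new lines once
--     # and splices them in with a single slice assignment.
--     if last_index == -1:
--         file_content.extend("\nmRankAdamRequirements=%d" % k
--                             for k in range(1, add_amount - current_amount + 1))
--     else:
--         new_lines = [f"mRankAdamRequirements={last_adam_amount + k}\n"
--                      for k in range(1, add_amount + 1)]
--         file_content[last_index + 1:last_index + 1] = new_lines
--     return file_content
-- ===== Notes on version B (the rewrite author's own statement) =====
-- stated objective: faster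
-- what changed: Instead of calling list.insert once per new line (each insert shifting the whole tail), B builds the list of rank-requirement lines once and splices it into file_content with a single slice assignment (extend for the append branch).
-- intended difference: On last_index <= -2 with add_amount >= 2 (except the one corner add_amount = 2, len(file_content) + last_index = -2, last_index <= -3, where both agree), A re-uses its stale negative insertion index against a list that grows under it and scatters (sometimes reverses) the new lines, while B inserts them as one contiguous block after the (wrapped) position, which is the intended result; A != B is proved everywhere in this region. — e.g. on add_adam_requirements(0, 2, ["a"], -2, 0): A returns ["mRankAdamRequirements=2\n", "mRankAdamRequirements=1\n", "a"], B returns ["mRankAdamRequirements=1\n", "mRankAdamRequirements=2\n", "a"]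
import Mathlib
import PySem

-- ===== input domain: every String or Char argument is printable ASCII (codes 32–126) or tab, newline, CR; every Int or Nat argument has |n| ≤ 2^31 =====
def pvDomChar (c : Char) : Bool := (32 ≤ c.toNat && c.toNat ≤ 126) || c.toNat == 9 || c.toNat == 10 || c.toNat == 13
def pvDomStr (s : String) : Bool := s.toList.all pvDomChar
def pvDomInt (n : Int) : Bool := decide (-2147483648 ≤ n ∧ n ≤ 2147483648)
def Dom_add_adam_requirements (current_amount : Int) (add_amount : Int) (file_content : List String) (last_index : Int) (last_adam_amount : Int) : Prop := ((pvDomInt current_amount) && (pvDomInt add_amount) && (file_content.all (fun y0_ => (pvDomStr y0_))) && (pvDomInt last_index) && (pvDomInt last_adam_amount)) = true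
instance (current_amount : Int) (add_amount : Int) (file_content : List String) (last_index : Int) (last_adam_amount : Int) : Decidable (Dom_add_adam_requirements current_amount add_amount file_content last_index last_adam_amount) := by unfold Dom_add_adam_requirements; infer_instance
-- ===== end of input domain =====

-- B builds the new lines once and splices them in with a single slice assignment instead of
-- repeated list.insert calls; both Pythons mutate file_content in place (the equivalence
-- proved here is about the return value). On last_index ≤ -2 with 2 ≤ add_amount (D_ below),
-- A's stale negative insertion index scatters the new lines; B inserts a contiguous block.


-- f"mRankAdamRequirements={k}\n"
def adamLine (k : Int) : String := "mRankAdamRequirements=" ++ PySem.Int.toStr k ++ "\n"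
-- f"\nmRankAdamRequirements={k}"
def adamLineNL (k : Int) : String := "\nmRankAdamRequirements=" ++ PySem.Int.toStr k

-- ===== PORT A =====
def add_adam_requirements (current_amount : Int) (add_amount : Int) (file_content : List String) (last_index : Int) (last_adam_amount : Int) : List String :=
  if last_index ≠ -1 then
    -- for i in range(current_amount, current_amount + add_amount):
    --   last_adam_amount += 1; file_content.insert(last_index + 1, line); last_index += 1
    ((PySem.List.pyRange current_amount (current_amount + add_amount) 1).foldl
      (fun (st : List String × Int × Int) _ =>
        let la := st.2.2 + 1
        (PySem.List.insert st.1 (st.2.1 + 1) (adamLine la), st.2.1 + 1, la))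
      (file_content, last_index, last_adam_amount)).1
  else
    -- last_adam_amount = 0
    -- for i in range(current_amount, add_amount): last_adam_amount += 1; file_content.append(line)
    ((PySem.List.pyRange current_amount add_amount 1).foldl
      (fun (st : List String × Int) _ =>
        let la := st.2 + 1
        (st.1 ++ [adamLineNL la], la))
      (file_content, (0 : Int))).1

-- ===== PORT B =====
def add_adam_requirements_alt (current_amount : Int) (add_amount : Int) (file_content : List String) (last_index : Int) (last_adam_amount : Int) : List String :=
  if last_index == -1 then
    -- file_content.extend("..." % k for k in range(1, add_amount - current_amount + 1))
    file_content ++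
      (PySem.List.pyRange 1 (add_amount - current_amount + 1) 1).map (fun k => adamLineNL k)
  else
    -- new_lines = [... for k in range(1, add_amount + 1)]
    -- file_content[last_index+1:last_index+1] = new_lines
    let newLines := (PySem.List.pyRange 1 (add_amount + 1) 1).map
      (fun k => adamLine (last_adam_amount + k))
    PySem.List.slice file_content none (some (last_index + 1)) ++ newLines ++
      PySem.List.slice file_content (some (last_index + 1)) none

-- ===== PRECONDITION & SPEC =====
-- Pre_ excludes only the content-collision corner of the quirk region below: last_index ≤ -2
-- with at least two lines to insert AND file_content already containing a line starting with
-- "mRankAdamRequirements=" — there A's scattered insertion can coincide with (or differ from)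
-- B's contiguous block purely by content accident, so neither value is canonical.
def Pre_add_adam_requirements (current_amount : Int) (add_amount : Int) (file_content : List String) (last_index : Int) (last_adam_amount : Int) : Prop :=
  (last_index ≤ -2 ∧ 2 ≤ add_amount) →
    ∀ s ∈ file_content, PySem.Str.startswith s "mRankAdamRequirements=" = false
instance (current_amount : Int) (add_amount : Int) (file_content : List String) (last_index : Int) (last_adam_amount : Int) : Decidable (Pre_add_adam_requirements current_amount add_amount file_content last_index last_adam_amount) := by unfold Pre_add_adam_requirements; infer_instance
def pvWitness_add_adam_requirements : Int × Int × List String × Int × Int := (0, 1, ["a"], 0, 0)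

-- On last_index ≤ -2 with at least two lines to insert (except the one agreeing corner
-- add_amount = 2 ∧ len(file_content) + last_index = -2 ∧ last_index ≤ -3), A re-uses its
-- stale negative insertion index against a list that grows under it and scatters (sometimes
-- reverses) the new lines; B inserts them as one contiguous block after the (wrapped)
-- position, the intended result.
def D_add_adam_requirements (current_amount : Int) (add_amount : Int) (file_content : List String) (last_index : Int) (last_adam_amount : Int) : Prop :=
  last_index ≤ -2 ∧ 2 ≤ add_amount ∧
    ¬(add_amount = 2 ∧ (file_content.length : Int) + last_index = -2 ∧ last_index ≤ -3)
instance (current_amount : Int) (add_amount : Int) (file_content : List String) (last_index : Int) (last_adam_amount : Int) : Decidable (D_add_adam_requirements current_amount add_amount file_content last_index last_adam_amount) := by unfold D_add_adam_requirements; infer_instance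

def Spec_add_adam_requirements (current_amount : Int) (add_amount : Int) (file_content : List String) (last_index : Int) (last_adam_amount : Int) (out : List String) : Prop := ¬ D_add_adam_requirements current_amount add_amount file_content last_index last_adam_amount → out = add_adam_requirements_alt current_amount add_amount file_content last_index last_adam_amount
instance (current_amount : Int) (add_amount : Int) (file_content : List String) (last_index : Int) (last_adam_amount : Int) (out : List String) : Decidable (Spec_add_adam_requirements current_amount add_amount file_content last_index last_adam_amount out) := by unfold Spec_add_adam_requirements; infer_instance

def pvDiffWitness_add_adam_requirements : Int × Int × List String × Int × Int := (0, 2, ["a"], -2, 0)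
def pvDiffWitnessOut_add_adam_requirements : (List String) × (List String) :=
  (["mRankAdamRequirements=2\n", "mRankAdamRequirements=1\n", "a"],
   ["mRankAdamRequirements=1\n", "mRankAdamRequirements=2\n", "a"])

-- ===== CLAIM (what is proved, stated in full; the proofs are below) =====
def Claim_unchanged_add_adam_requirements : Prop := ∀ (current_amount : Int) (add_amount : Int) (file_content : List String) (last_index : Int) (last_adam_amount : Int), Dom_add_adam_requirements current_amount add_amount file_content last_index last_adam_amount → Pre_add_adam_requirements current_amount add_amount file_content last_index last_adam_amount → Spec_add_adam_requirements current_amount add_amount file_content last_index last_adam_amount (add_adam_requirements current_amount add_amount file_content last_index last_adam_amount)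
def Claim_changed_add_adam_requirements : Prop := Dom_add_adam_requirements (pvDiffWitness_add_adam_requirements.1) (pvDiffWitness_add_adam_requirements.2.1) (pvDiffWitness_add_adam_requirements.2.2.1) (pvDiffWitness_add_adam_requirements.2.2.2.1) (pvDiffWitness_add_adam_requirements.2.2.2.2) ∧ Pre_add_adam_requirements (pvDiffWitness_add_adam_requirements.1) (pvDiffWitness_add_adam_requirements.2.1) (pvDiffWitness_add_adam_requirements.2.2.1) (pvDiffWitness_add_adam_requirements.2.2.2.1) (pvDiffWitness_add_adam_requirements.2.2.2.2) ∧ D_add_adam_requirements (pvDiffWitness_add_adam_requirements.1) (pvDiffWitness_add_adam_requirements.2.1) (pvDiffWitness_add_adam_requirements.2.2.1) (pvDiffWitness_add_adam_requirements.2.2.2.1) (pvDiffWitness_add_adam_requirements.2.2.2.2) ∧ add_adam_requirements (pvDiffWitness_add_adam_requirements.1) (pvDiffWitness_add_adam_requirements.2.1) (pvDiffWitness_add_adam_requirements.2.2.1) (pvDiffWitness_add_adam_requirements.2.2.2.1) (pvDiffWitness_add_adam_requirements.2.2.2.2) = pvDiffWitnessOut_add_adam_requirements.1 ∧ add_adam_requirements_alt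 (pvDiffWitness_add_adam_requirements.1) (pvDiffWitness_add_adam_requirements.2.1) (pvDiffWitness_add_adam_requirements.2.2.1) (pvDiffWitness_add_adam_requirements.2.2.2.1) (pvDiffWitness_add_adam_requirements.2.2.2.2) = pvDiffWitnessOut_add_adam_requirements.2 ∧ pvDiffWitnessOut_add_adam_requirements.1 ≠ pvDiffWitnessOut_add_adam_requirements.2
def Claim_exact_add_adam_requirements : Prop := ∀ (current_amount : Int) (add_amount : Int) (file_content : List String) (last_index : Int) (last_adam_amount : Int), Dom_add_adam_requirements current_amount add_amount file_content last_index last_adam_amount → Pre_add_adam_requirements current_amount add_amount file_content last_index last_adam_amount → D_add_adam_requirements current_amount add_amount file_content last_index last_adam_amount → add_adam_requirements current_amount add_amount file_content last_index last_adam_amount ≠ add_adam_requirements_alt current_amount add_amount file_content last_index last_adam_amount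

-- ===== LEMMAS AND PROOFS =====

-- the lines f(j), f(j+1), …, f(j+n-1)
def intLines (f : Int → String) : Nat → Int → List String
  | 0, _ => []
  | n + 1, j => f j :: intLines f n (j + 1)

lemma intLines_shift (f : Int → String) (c : Int) (n : Nat) (j : Int) :
    intLines (fun k => f (c + k)) n j = intLines f n (c + j) := by
  induction n generalizing j with
  | zero => rfl
  | succ n ih => simp only [intLines, ih]; rw [show c + (j + 1) = c + j + 1 by ring]

lemma pyRange_map_intLines (g : Int → String) (n : Nat) (j : Int) :
    (PySem.List.pyRange j (j + (n : Int)) 1).map g = intLines g n j := by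
  induction n generalizing j with
  | zero => simp [PySem.List.pyRange_one_eq_nil, intLines]
  | succ n ih =>
    rw [PySem.List.pyRange_one_cons (by omega)]
    simp only [List.map_cons, intLines]
    congr 1
    rw [show j + ((n + 1 : Nat) : Int) = (j + 1) + (n : Int) by push_cast; ring]
    exact ih (j + 1)

-- A's append loop (last_index == -1 branch); the loop variable is unused.
lemma appendLoop (r : List Int) (acc : List String) (j : Int) :
    (r.foldl (fun (st : List String × Int) _ =>
        let la := st.2 + 1
        (st.1 ++ [adamLineNL la], la)) (acc, j))
      = (acc ++ intLines adamLineNL r.length (j + 1), j + r.length) := by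
  induction r generalizing acc j with
  | nil => simp [intLines]
  | cons x r ih =>
    simp only [List.foldl_cons, List.length_cons]
    rw [ih]
    refine Prod.ext ?_ ?_
    · show acc ++ [adamLineNL (j + 1)] ++ intLines adamLineNL r.length (j + 1 + 1) = _
      simp only [List.append_assoc, List.singleton_append]
      rfl
    · push_cast; ring

-- Python list.insert clamps its index exactly like a slice boundary.
lemma insert_eq_clamp {α : Type} (xs : List α) (i : Int) (v : α) :
    PySem.List.insert xs i v =
      xs.take (PySem.List.clampIdx xs.length i) ++ v :: xs.drop (PySem.List.clampIdx xs.length i) := by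
  simp only [PySem.List.insert, PySem.List.sliceIndices, PySem.List.clampIdx]
  norm_num
  split_ifs with h1 h2
  · rw [show (max (i + (xs.length : Int)) 0).toNat = 0 by omega]
  · rw [show (max (i + (xs.length : Int)) 0).toNat = ((xs.length : Int) + i).toNat by omega]
  · rw [show (min i (xs.length : Int)).toNat = min i.toNat xs.length by omega]

-- A's insert loop when the insertion point stays inside the list: the front grows by one line each step.
lemma insertLoopFront (r : List Int) (front back : List String) (la : Int) :
    (r.foldl (fun (st : List String × Int × Int) _ =>
        let la := st.2.2 + 1
        (PySem.List.insert st.1 (st.2.1 + 1) (adamLine la), st.2.1 + 1, la))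
      (front ++ back, (front.length : Int) - 1, la)).1
      = front ++ intLines adamLine r.length (la + 1) ++ back := by
  induction r generalizing front la with
  | nil => simp [intLines]
  | cons x r ih =>
    simp only [List.foldl_cons]
    have hq : PySem.List.clampIdx (front ++ back).length ((front.length : Int) - 1 + 1)
        = front.length := by
      simp only [PySem.List.clampIdx, List.length_append]
      split_ifs <;> omega
    rw [show (front.length : Int) - 1 + 1 = (front.length : Int) by ring] at hq ⊢
    rw [insert_eq_clamp, hq, List.take_left, List.drop_left]
    have := ih (front ++ [adamLine (la + 1)]) (la + 1)
    simp only [List.length_append, List.length_cons, List.length_nil, Nat.cast_add,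
      Nat.cast_one, List.append_assoc, List.singleton_append] at this ⊢
    norm_num at this
    rw [show intLines adamLine (r.length + 1) (la + 1)
          = adamLine (la + 1) :: intLines adamLine r.length (la + 1 + 1) from rfl]
    exact this

-- A's insert loop when the insertion point is at or past the end: every insert appends.
lemma insertLoopPast (r : List Int) (xs : List String) (li la : Int)
    (h : (xs.length : Int) ≤ li + 1) :
    (r.foldl (fun (st : List String × Int × Int) _ =>
        let la := st.2.2 + 1
        (PySem.List.insert st.1 (st.2.1 + 1) (adamLine la), st.2.1 + 1, la))
      (xs, li, la)).1
      = xs ++ intLines adamLine r.length (la + 1) := by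
  induction r generalizing xs li la with
  | nil => simp [intLines]
  | cons x r ih =>
    simp only [List.foldl_cons]
    have hq : PySem.List.clampIdx xs.length (li + 1) = xs.length := by
      simp only [PySem.List.clampIdx]
      split_ifs <;> omega
    rw [insert_eq_clamp, hq, List.take_length, List.drop_length]
    have := ih (xs ++ [adamLine (la + 1)]) (li + 1) (la + 1) (by simp; omega)
    simp only [List.append_assoc, List.singleton_append] at this ⊢
    rw [this]
    rfl

lemma slice_none_some {α : Type} (xs : List α) (b : Int) :
    PySem.List.slice xs none (some b) = xs.take (PySem.List.clampIdx xs.length b) := by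
  simp [PySem.List.slice]

lemma slice_some_none' {α : Type} (xs : List α) (a : Int) :
    PySem.List.slice xs (some a) none = xs.drop (PySem.List.clampIdx xs.length a) := by
  simp [PySem.List.slice, List.take_drop]

-- B's new_lines, re-indexed to start at last_adam_amount + 1.
lemma newLines_eq (a la : Int) :
    (PySem.List.pyRange 1 (a + 1) 1).map (fun k => adamLine (la + k))
      = intLines adamLine a.toNat (la + 1) := by
  by_cases ha : 0 ≤ a
  · rw [show a + 1 = 1 + (a.toNat : Int) by omega]
    rw [pyRange_map_intLines (fun k => adamLine (la + k)) a.toNat 1]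
    rw [intLines_shift adamLine la a.toNat 1]
  · rw [PySem.List.pyRange_one_eq_nil (by omega), show a.toNat = 0 by omega]
    rfl

lemma main_equiv : ∀ (c a : Int) (fc : List String) (li la : Int),
    ¬ (li ≤ -2 ∧ 2 ≤ a) →
    add_adam_requirements c a fc li la = add_adam_requirements_alt c a fc li la := by
  intro c a fc li la hnD
  by_cases hli : li = -1
  · subst hli
    have hA : add_adam_requirements c a fc (-1) la
        = fc ++ intLines adamLineNL (a - c).toNat 1 := by
      simp only [add_adam_requirements]
      rw [if_neg (by norm_num), appendLoop]
      dsimp only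
      rw [PySem.List.length_pyRange_one]
      norm_num
    have hB : add_adam_requirements_alt c a fc (-1) la
        = fc ++ intLines adamLineNL (a - c).toNat 1 := by
      simp only [add_adam_requirements_alt]
      rw [if_pos (by norm_num)]
      congr 1
      by_cases hac : 0 ≤ a - c
      · rw [show a - c + 1 = 1 + ((a - c).toNat : Int) by omega,
          pyRange_map_intLines (fun k => adamLineNL k) (a - c).toNat 1]
      · rw [PySem.List.pyRange_one_eq_nil (by omega), show (a - c).toNat = 0 by omega]
        rfl
    rw [hA, hB]
  · simp only [add_adam_requirements, add_adam_requirements_alt, beq_iff_eq]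
    rw [if_pos hli, if_neg hli]
    rw [slice_none_some, slice_some_none', newLines_eq]
    have hlen : (PySem.List.pyRange c (c + a) 1).length = a.toNat := by
      rw [PySem.List.length_pyRange_one]; omega
    by_cases hge : 0 ≤ li
    · by_cases hin : li + 1 ≤ (fc.length : Int)
      · have hq : PySem.List.clampIdx fc.length (li + 1) = (li + 1).toNat := by
          simp only [PySem.List.clampIdx]; split_ifs <;> omega
        rw [hq]
        have hsplit := List.take_append_drop (li + 1).toNat fc
        have key := insertLoopFront (PySem.List.pyRange c (c + a) 1)
          (fc.take (li + 1).toNat) (fc.drop (li + 1).toNat) la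
        rw [hsplit] at key
        rw [show ((fc.take (li + 1).toNat).length : Int) - 1 = li by
          simp only [List.length_take]; omega] at key
        rw [hlen] at key
        exact key
      · have hq : PySem.List.clampIdx fc.length (li + 1) = fc.length := by
          simp only [PySem.List.clampIdx]; split_ifs <;> omega
        rw [hq, List.take_length, List.drop_length, List.append_nil]
        rw [insertLoopPast _ _ _ _ (by omega), hlen]
    · -- li ≤ -2 here, hence (¬ D_) a ≤ 1
      by_cases ha0 : a ≤ 0
      · rw [PySem.List.pyRange_one_eq_nil (show c + a ≤ c by omega),
          show a.toNat = 0 by omega]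
        simp [intLines, List.take_append_drop]
      · have ha : a = 1 := by omega
        subst ha
        rw [show PySem.List.pyRange c (c + 1) 1 = [c] by
          rw [PySem.List.pyRange_one_cons (by omega), PySem.List.pyRange_one_eq_nil (by omega)]]
        simp only [List.foldl_cons, List.foldl_nil]
        rw [insert_eq_clamp]
        simp [intLines]


-- A's branch condition and loop, and B's splice, in normal form.
lemma A_eq (c a : Int) (fc : List String) (li la : Int) (h : li ≠ -1) :
    add_adam_requirements c a fc li la
      = ((PySem.List.pyRange c (c + a) 1).foldl
          (fun (st : List String × Int × Int) _ =>
            let la := st.2.2 + 1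
            (PySem.List.insert st.1 (st.2.1 + 1) (adamLine la), st.2.1 + 1, la))
          (fc, li, la)).1 := by
  simp only [add_adam_requirements]
  rw [if_pos h]

lemma alt_eq (c a : Int) (fc : List String) (li la : Int) (h : li ≠ -1) :
    add_adam_requirements_alt c a fc li la
      = fc.take (PySem.List.clampIdx fc.length (li + 1)) ++ intLines adamLine a.toNat (la + 1)
          ++ fc.drop (PySem.List.clampIdx fc.length (li + 1)) := by
  simp only [add_adam_requirements_alt, beq_iff_eq]
  rw [if_neg h, slice_none_some, slice_some_none', newLines_eq]

lemma clampIdx_le' (n : Nat) (i : Int) : PySem.List.clampIdx n i ≤ n := by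
  simp only [PySem.List.clampIdx]; split_ifs <;> omega

-- === decimal-representation injectivity (str(n) is injective) ===
def pvEval (a : Nat) (cs : List Char) : Nat := cs.foldl (fun x c => x * 10 + (c.toNat - 48)) a

lemma digitChar_toNat (n : Nat) (h : n < 10) : (Nat.digitChar n).toNat = 48 + n := by
  interval_cases n <;> decide

lemma digitChar_ne_dash (n : Nat) (h : n < 10) : Nat.digitChar n ≠ '-' := by
  interval_cases n <;> decide

lemma evalCore (f : Nat) : ∀ n l a, n < f →
    pvEval a (Nat.toDigitsCore 10 f n l) = pvEval (a * 10 ^ (Nat.log 10 n + 1) + n) l := by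
  induction f with
  | zero => intro n l a h; omega
  | succ f ih =>
    intro n l a h
    rw [Nat.toDigitsCore]
    by_cases h10 : n / 10 = 0
    · rw [if_pos h10]
      show pvEval (a * 10 + ((n % 10).digitChar.toNat - 48)) l = _
      rw [digitChar_toNat (n % 10) (by omega)]
      rw [Nat.log_eq_zero_iff.mpr (Or.inl (by omega))]
      congr 1
      have : (10 : Nat) ^ (0 + 1) = 10 := by norm_num
      rw [this]
      omega
    · rw [if_neg h10]
      rw [ih (n / 10) _ a (by omega)]
      show pvEval ((a * 10 ^ (Nat.log 10 (n / 10) + 1) + n / 10) * 10 + ((n % 10).digitChar.toNat - 48)) l = _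
      rw [digitChar_toNat (n % 10) (by omega)]
      congr 1
      have hlog : Nat.log 10 (n / 10) + 1 = Nat.log 10 n := by
        rw [Nat.log_div_base]
        have := Nat.log_pos (b := 10) (by norm_num) (show 10 ≤ n by omega)
        omega
      rw [← hlog, pow_succ]
      have h48 : 48 + n % 10 - 48 = n % 10 := by omega
      rw [h48]
      have hdm : n / 10 * 10 + n % 10 = n := by omega
      calc (a * 10 ^ (Nat.log 10 (n / 10) + 1) + n / 10) * 10 + n % 10
          = a * (10 ^ (Nat.log 10 (n / 10) + 1) * 10) + (n / 10 * 10 + n % 10) := by ring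
        _ = a * (10 ^ (Nat.log 10 (n / 10) + 1) * 10) + n := by rw [hdm]

lemma toDigits_inj (m n : Nat) (h : Nat.toDigits 10 m = Nat.toDigits 10 n) : m = n := by
  have em := evalCore (m + 1) m [] 0 (by omega)
  have en := evalCore (n + 1) n [] 0 (by omega)
  simp only [Nat.toDigits] at h
  rw [h] at em
  rw [en] at em
  simpa [pvEval] using em.symm

lemma dash_not_mem_toDigitsCore (f : Nat) : ∀ n l, '-' ∉ l → '-' ∉ Nat.toDigitsCore 10 f n l := by
  induction f with
  | zero => intro n l hl; exact hl
  | succ f ih =>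
    intro n l hl
    rw [Nat.toDigitsCore]
    by_cases h10 : n / 10 = 0
    · rw [if_pos h10]
      intro hmem
      rcases List.mem_cons.mp hmem with h | h
      · exact digitChar_ne_dash (n % 10) (by omega) h.symm
      · exact hl h
    · rw [if_neg h10]
      refine ih (n / 10) _ ?_
      intro hmem
      rcases List.mem_cons.mp hmem with h | h
      · exact digitChar_ne_dash (n % 10) (by omega) h.symm
      · exact hl h

lemma toChars_inj (x y : Int) (h : PySem.Int.toChars x = PySem.Int.toChars y) : x = y := by
  simp only [PySem.Int.toChars] at h
  split_ifs at h with h1 h2 h2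
  · injection h with h1' h2'
    have := toDigits_inj _ _ h2'
    omega
  · exact absurd (h ▸ List.mem_cons_self ..) (dash_not_mem_toDigitsCore _ _ [] (by simp))
  · exact absurd (h.symm ▸ List.mem_cons_self ..) (dash_not_mem_toDigitsCore _ _ [] (by simp))
  · have := toDigits_inj _ _ h
    omega

-- === facts about the generated lines ===
lemma adamLine_toList (k : Int) :
    (adamLine k).toList = "mRankAdamRequirements=".toList ++ PySem.Int.toChars k ++ ['\n'] := by
  simp [adamLine, PySem.Int.toStr]

lemma adamLine_startswith (k : Int) :
    PySem.Str.startswith (adamLine k) "mRankAdamRequirements=" = true := by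
  simp [PySem.Str.startswith, PySem.Chars.startswith, List.isPrefixOf_iff_prefix, adamLine_toList]

lemma ne_adamLine_of_not_startswith (s : String) (k : Int)
    (h : PySem.Str.startswith s "mRankAdamRequirements=" = false) : s ≠ adamLine k := by
  intro he
  rw [he, adamLine_startswith] at h
  simp at h

lemma adamLine_inj (x y : Int) (h : adamLine x = adamLine y) : x = y := by
  have h2 := congrArg String.toList h
  rw [adamLine_toList, adamLine_toList, List.append_assoc, List.append_assoc] at h2
  have h3 := List.append_cancel_left h2
  have h4 := List.append_cancel_right h3
  exact toChars_inj x y h4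

lemma intLines_length (f : Int → String) : ∀ (t : Nat) (j : Int), (intLines f t j).length = t := by
  intro t
  induction t with
  | zero => intro j; rfl
  | succ t ih => intro j; simp [intLines, ih]

lemma intLines_getElem (f : Int → String) (t : Nat) : ∀ (j : Int) (i : Nat), i < t →
    (intLines f t j)[i]? = some (f (j + i)) := by
  induction t with
  | zero => intro j i h; omega
  | succ t ih =>
    intro j i h
    cases i with
    | zero => simp [intLines]
    | succ i =>
      simp only [intLines, List.getElem?_cons_succ]
      rw [ih (j + 1) i (by omega)]
      congr 2
      push_cast
      ring

lemma lines_at (fc : List String) (t : Nat) (j : Int) (i : Nat) (hi : i < t) :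
    (intLines adamLine t j ++ fc)[i]? = some (adamLine (j + i)) := by
  rw [List.getElem?_append_left (by rw [intLines_length]; omega)]
  exact intLines_getElem _ _ _ _ hi

lemma B_at (fc : List String) (q t : Nat) (j : Int) (i : Nat) (hq : q ≤ fc.length) (hi : i < t) :
    (fc.take q ++ intLines adamLine t j ++ fc.drop q)[q + i]? = some (adamLine (j + i)) := by
  rw [List.append_assoc]
  rw [List.getElem?_append_right (by simp only [List.length_take]; omega)]
  rw [show q + i - (fc.take q).length = i by simp only [List.length_take]; omega]
  exact lines_at _ _ _ _ hi

-- === the A-loop: state components, length, and low-index preservation ===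
lemma loop_snd (r : List Int) : ∀ (xs : List String) (li la : Int),
    (r.foldl (fun (st : List String × Int × Int) _ =>
        let la := st.2.2 + 1
        (PySem.List.insert st.1 (st.2.1 + 1) (adamLine la), st.2.1 + 1, la)) (xs, li, la)).2
      = (li + r.length, la + r.length) := by
  induction r with
  | nil => intro xs li la; simp
  | cons x r ih =>
    intro xs li la
    simp only [List.foldl_cons, List.length_cons]
    rw [ih]
    refine Prod.ext ?_ ?_ <;> (dsimp only; push_cast; ring)

lemma loop_len (r : List Int) : ∀ (xs : List String) (li la : Int),
    (r.foldl (fun (st : List String × Int × Int) _ =>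
        let la := st.2.2 + 1
        (PySem.List.insert st.1 (st.2.1 + 1) (adamLine la), st.2.1 + 1, la)) (xs, li, la)).1.length
      = xs.length + r.length := by
  induction r with
  | nil => intro xs li la; simp
  | cons x r ih =>
    intro xs li la
    simp only [List.foldl_cons, List.length_cons]
    rw [ih, insert_eq_clamp]
    have := clampIdx_le' xs.length (li + 1)
    simp
    omega

lemma loop_preserve (r : List Int) : ∀ (xs : List String) (li la : Int) (i : Nat),
    (∀ j : Nat, j < r.length → (i : Int) < (PySem.List.clampIdx (xs.length + j) (li + 1 + j) : Nat)) →
    (r.foldl (fun (st : List String × Int × Int) _ =>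
        let la := st.2.2 + 1
        (PySem.List.insert st.1 (st.2.1 + 1) (adamLine la), st.2.1 + 1, la)) (xs, li, la)).1[i]?
      = xs[i]? := by
  induction r with
  | nil => intro xs li la i _; rfl
  | cons x r ih =>
    intro xs li la i h
    simp only [List.foldl_cons]
    have h0 := h 0 (by simp)
    norm_num at h0
    rw [ih]
    · rw [insert_eq_clamp]
      have hq := clampIdx_le' xs.length (li + 1)
      rw [List.getElem?_append_left (by simp [List.length_take]; omega)]
      rw [List.getElem?_take_of_lt (by omega)]
    · intro j hj
      have := h (j + 1) (by simp; omega)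
      rw [insert_eq_clamp]
      have hq := clampIdx_le' xs.length (li + 1)
      simp only [List.length_append, List.length_take, List.length_cons, List.length_drop]
      convert this using 3
      · omega
      · push_cast; ring

lemma loop_low (r : List Int) (xs : List String) (li la : Int) (K i : Nat) (hK : K ≤ r.length)
    (hrest : ∀ j : Nat, K ≤ j → j < r.length →
      (i : Int) < (PySem.List.clampIdx (xs.length + j) (li + 1 + j) : Nat)) :
    (r.foldl (fun (st : List String × Int × Int) _ =>
        let la := st.2.2 + 1
        (PySem.List.insert st.1 (st.2.1 + 1) (adamLine la), st.2.1 + 1, la)) (xs, li, la)).1[i]?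
      = ((r.take K).foldl (fun (st : List String × Int × Int) _ =>
        let la := st.2.2 + 1
        (PySem.List.insert st.1 (st.2.1 + 1) (adamLine la), st.2.1 + 1, la)) (xs, li, la)).1[i]? := by
  conv_lhs => rw [← List.take_append_drop K r, List.foldl_append]
  set s := (r.take K).foldl (fun (st : List String × Int × Int) _ =>
        let la := st.2.2 + 1
        (PySem.List.insert st.1 (st.2.1 + 1) (adamLine la), st.2.1 + 1, la)) (xs, li, la) with hs
  have hlenK : (r.take K).length = K := by simp [List.length_take]; omega
  have h2 : s.2 = (li + K, la + K) := by rw [hs, loop_snd, hlenK]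
  have h1 : s.1.length = xs.length + K := by rw [hs, loop_len, hlenK]
  have hsplit : s = (s.1, li + (K : Int), la + (K : Int)) := by
    rw [← h2]
  rw [hsplit]
  apply loop_preserve
  intro j hj
  have hdl : (r.drop K).length = r.length - K := by simp
  have := hrest (K + j) (by omega) (by omega)
  rw [h1]
  convert this using 3
  · omega
  · push_cast; ring

lemma loop_head (r : List Int) (xs : List String) (li la : Int) (K : Nat) (hK : K < r.length)
    (h0 : PySem.List.clampIdx (xs.length + K) (li + 1 + K) = 0)
    (hrest : ∀ j : Nat, K < j → j < r.length →
      0 < (PySem.List.clampIdx (xs.length + j) (li + 1 + j) : Nat)) :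
    (r.foldl (fun (st : List String × Int × Int) _ =>
        let la := st.2.2 + 1
        (PySem.List.insert st.1 (st.2.1 + 1) (adamLine la), st.2.1 + 1, la)) (xs, li, la)).1[0]?
      = some (adamLine (la + K + 1)) := by
  rw [loop_low r xs li la (K + 1) 0 (by omega)
    (by intro j hj1 hj2; exact_mod_cast hrest j (by omega) hj2)]
  have htk : r.take (K + 1) = r.take K ++ [r[K]'(by omega)] := by
    rw [List.take_add_one]
    simp [List.getElem?_eq_getElem (by omega : K < r.length)]
  rw [htk, List.foldl_append]
  set s := (r.take K).foldl (fun (st : List String × Int × Int) _ =>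
        let la := st.2.2 + 1
        (PySem.List.insert st.1 (st.2.1 + 1) (adamLine la), st.2.1 + 1, la)) (xs, li, la) with hs
  have hlenK : (r.take K).length = K := by simp [List.length_take]; omega
  have h2 : s.2 = (li + K, la + K) := by rw [hs, loop_snd, hlenK]
  have h1 : s.1.length = xs.length + K := by rw [hs, loop_len, hlenK]
  have hsplit : s = (s.1, li + (K : Int), la + (K : Int)) := by rw [← h2]
  rw [hsplit]
  simp only [List.foldl_cons, List.foldl_nil]
  rw [insert_eq_clamp]
  have hq : PySem.List.clampIdx s.1.length (li + (K : Int) + 1) = 0 := by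
    rw [h1]
    convert h0 using 2
    ring
  rw [hq]
  simp

-- the one agreeing corner inside the quirk region: two lines, both landing contiguously
lemma agree_case (c : Int) (fc : List String) (li la : Int)
    (hli : li ≤ -3) (hm : (fc.length : Int) + li = -2) :
    add_adam_requirements c 2 fc li la = add_adam_requirements_alt c 2 fc li la := by
  rw [A_eq c 2 fc li la (by omega), alt_eq c 2 fc li la (by omega)]
  have hr : PySem.List.pyRange c (c + 2) 1 = [c, c + 1] := by
    rw [PySem.List.pyRange_one_cons (by omega), PySem.List.pyRange_one_cons (by omega),
      PySem.List.pyRange_one_eq_nil (by omega)]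
  rw [hr]
  simp only [List.foldl_cons, List.foldl_nil]
  have hq0 : PySem.List.clampIdx fc.length (li + 1) = 0 := by
    simp only [PySem.List.clampIdx]; split_ifs <;> omega
  rw [insert_eq_clamp fc (li + 1) (adamLine (la + 1)), hq0]
  simp only [List.take_zero, List.drop_zero, List.nil_append]
  rw [insert_eq_clamp]
  have hq1 : PySem.List.clampIdx (adamLine (la + 1) :: fc).length (li + 1 + 1) = 1 := by
    simp only [PySem.List.clampIdx, List.length_cons]; split_ifs <;> omega
  rw [hq1]
  show [adamLine (la + 1)] ++ adamLine (la + 1 + 1) :: fc = _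
  simp [intLines]

lemma tight_main (c a : Int) (fc : List String) (li la : Int)
    (hli : li ≤ -2) (ha : 2 ≤ a)
    (hna : ¬(a = 2 ∧ (fc.length : Int) + li = -2 ∧ li ≤ -3))
    (hnp : ∀ s ∈ fc, PySem.Str.startswith s "mRankAdamRequirements=" = false) :
    add_adam_requirements c a fc li la ≠ add_adam_requirements_alt c a fc li la := by
  have hli1 : li ≠ -1 := by omega
  rw [A_eq c a fc li la hli1, alt_eq c a fc li la hli1]
  have hrlen : (PySem.List.pyRange c (c + a) 1).length = a.toNat := by
    rw [PySem.List.length_pyRange_one]; omega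
  have hqle := clampIdx_le' fc.length (li + 1)
  intro hAB
  by_cases hI : 0 ≤ li + a
  · -- the insertion index reaches 0: the head of A's result is line (-li)
    have hA0 := loop_head (PySem.List.pyRange c (c + a) 1) fc li la (-li - 1).toNat
      (by rw [hrlen]; omega)
      (by simp only [PySem.List.clampIdx]; split_ifs <;> omega)
      (by intro j hj1 hj2; rw [hrlen] at hj2
          simp only [PySem.List.clampIdx]; split_ifs <;> omega)
    rw [hAB] at hA0
    by_cases hm1 : 1 ≤ (fc.length : Int) + li + 1
    · -- B's head is an untouched line of fc
      have hn0 : 0 < fc.length := by omega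
      have hB0 : (fc.take (PySem.List.clampIdx fc.length (li + 1)) ++
            intLines adamLine a.toNat (la + 1) ++
            fc.drop (PySem.List.clampIdx fc.length (li + 1)))[0]? = some (fc[0]'hn0) := by
        have hq1 : 1 ≤ PySem.List.clampIdx fc.length (li + 1) := by
          simp only [PySem.List.clampIdx]; split_ifs <;> omega
        rw [List.append_assoc, List.getElem?_append_left (by simp [List.length_take]; omega),
          List.getElem?_take_of_lt (by omega)]
        exact List.getElem?_eq_getElem hn0
      rw [hB0] at hA0
      exact ne_adamLine_of_not_startswith _ _ (hnp _ (List.getElem_mem hn0))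
        (Option.some.inj hA0)
    · -- B's head is line 1, A's head is a later line
      have hq0 : PySem.List.clampIdx fc.length (li + 1) = 0 := by
        simp only [PySem.List.clampIdx]; split_ifs <;> omega
      rw [hq0] at hA0
      simp only [List.take_zero, List.drop_zero, List.nil_append] at hA0
      rw [lines_at fc a.toNat (la + 1) 0 (by omega)] at hA0
      have := adamLine_inj _ _ (Option.some.inj hA0)
      omega
  · -- the insertion index stays negative throughout
    by_cases hm1 : 1 ≤ (fc.length : Int) + li + 1
    · -- A keeps fc's line at index q+1, where B has line 2
      have hqm : ((PySem.List.clampIdx fc.length (li + 1) : Nat) : Int)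
          = (fc.length : Int) + li + 1 := by
        simp only [PySem.List.clampIdx]; split_ifs <;> omega
      have hlow := loop_low (PySem.List.pyRange c (c + a) 1) fc li la 1
        (PySem.List.clampIdx fc.length (li + 1) + 1) (by rw [hrlen]; omega)
        (by intro j hj1 hj2; rw [hrlen] at hj2
            simp only [PySem.List.clampIdx]; split_ifs <;> omega)
      have ht1 : (PySem.List.pyRange c (c + a) 1).take 1 = [c] := by
        rw [PySem.List.pyRange_one_cons (by omega)]; rfl
      rw [ht1] at hlow
      simp only [List.foldl_cons, List.foldl_nil] at hlow
      rw [insert_eq_clamp] at hlow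
      have hqlt : PySem.List.clampIdx fc.length (li + 1) < fc.length := by omega
      have hstep : (fc.take (PySem.List.clampIdx fc.length (li + 1)) ++
            adamLine (la + 1) :: fc.drop (PySem.List.clampIdx fc.length (li + 1)))[
              PySem.List.clampIdx fc.length (li + 1) + 1]?
          = some (fc[PySem.List.clampIdx fc.length (li + 1)]'hqlt) := by
        rw [List.getElem?_append_right (by simp only [List.length_take]; omega)]
        rw [show PySem.List.clampIdx fc.length (li + 1) + 1 -
            (fc.take (PySem.List.clampIdx fc.length (li + 1))).length = 1 by
          simp only [List.length_take]; omega]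
        simp only [List.getElem?_cons_succ]
        rw [List.getElem?_drop]
        exact List.getElem?_eq_getElem (by omega)
      rw [hstep] at hlow
      rw [hAB] at hlow
      rw [B_at fc _ a.toNat (la + 1) 1 hqle (by omega)] at hlow
      exact ne_adamLine_of_not_startswith _ _ (hnp _ (List.getElem_mem hqlt))
        (Option.some.inj hlow.symm)
    · have hq0 : PySem.List.clampIdx fc.length (li + 1) = 0 := by
        simp only [PySem.List.clampIdx]; split_ifs <;> omega
      by_cases hm2 : (fc.length : Int) + li + 1 ≤ -2
      · -- A's head is a later line, B's head is line 1
        have hA0 := loop_head (PySem.List.pyRange c (c + a) 1) fc li la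
          (min (a.toNat - 1) ((-((fc.length : Int) + li + 1)).toNat / 2))
          (by rw [hrlen]; omega)
          (by simp only [PySem.List.clampIdx]; split_ifs <;> omega)
          (by intro j hj1 hj2; rw [hrlen] at hj2
              simp only [PySem.List.clampIdx]; split_ifs <;> omega)
        rw [hAB, hq0] at hA0
        simp only [List.take_zero, List.drop_zero, List.nil_append] at hA0
        rw [lines_at fc a.toNat (la + 1) 0 (by omega)] at hA0
        have := adamLine_inj _ _ (Option.some.inj hA0)
        omega
      · by_cases hm0 : (fc.length : Int) + li + 1 = 0
        · -- A keeps fc's first line at index 1, where B has line 2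
          have hn0 : 0 < fc.length := by omega
          have hlow := loop_low (PySem.List.pyRange c (c + a) 1) fc li la 1 1
            (by rw [hrlen]; omega)
            (by intro j hj1 hj2; rw [hrlen] at hj2
                simp only [PySem.List.clampIdx]; split_ifs <;> omega)
          have ht1 : (PySem.List.pyRange c (c + a) 1).take 1 = [c] := by
            rw [PySem.List.pyRange_one_cons (by omega)]; rfl
          rw [ht1] at hlow
          simp only [List.foldl_cons, List.foldl_nil] at hlow
          rw [insert_eq_clamp, hq0] at hlow
          simp only [List.take_zero, List.drop_zero, List.nil_append,
            List.getElem?_cons_succ] at hlow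
          rw [List.getElem?_eq_getElem hn0] at hlow
          rw [hAB, hq0] at hlow
          simp only [List.take_zero, List.drop_zero, List.nil_append] at hlow
          rw [lines_at fc a.toNat (la + 1) 1 (by omega)] at hlow
          exact ne_adamLine_of_not_startswith _ _ (hnp _ (List.getElem_mem hn0))
            (Option.some.inj hlow.symm)
        · -- len + li + 1 = -1: three or more lines, A keeps fc's first line at index 2
          have hm : (fc.length : Int) + li + 1 = -1 := by omega
          have hli3 : li ≤ -3 := by omega
          have ha3 : 3 ≤ a := by
            rcases lt_or_ge a 3 with h3 | h3
            · exact absurd ⟨by omega, by omega, hli3⟩ hna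
            · exact h3
          have hn0 : 0 < fc.length := by omega
          have hlow := loop_low (PySem.List.pyRange c (c + a) 1) fc li la 2 2
            (by rw [hrlen]; omega)
            (by intro j hj1 hj2; rw [hrlen] at hj2
                simp only [PySem.List.clampIdx]; split_ifs <;> omega)
          have ht2 : (PySem.List.pyRange c (c + a) 1).take 2 = [c, c + 1] := by
            rw [PySem.List.pyRange_one_cons (by omega), PySem.List.pyRange_one_cons (by omega)]
            rfl
          rw [ht2] at hlow
          simp only [List.foldl_cons, List.foldl_nil] at hlow
          rw [insert_eq_clamp fc (li + 1) (adamLine (la + 1)), hq0] at hlow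
          simp only [List.take_zero, List.drop_zero, List.nil_append] at hlow
          rw [insert_eq_clamp] at hlow
          have hq1 : PySem.List.clampIdx (adamLine (la + 1) :: fc).length (li + 1 + 1) = 1 := by
            simp only [PySem.List.clampIdx, List.length_cons]; split_ifs <;> omega
          rw [hq1] at hlow
          have hx2 : ((adamLine (la + 1) :: fc).take 1 ++
              adamLine (la + 1 + 1) :: (adamLine (la + 1) :: fc).drop 1)[2]?
              = some (fc[0]'hn0) := by
            show ([adamLine (la + 1)] ++ adamLine (la + 1 + 1) :: fc)[2]? = _
            simp only [List.singleton_append, List.getElem?_cons_succ]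
            exact List.getElem?_eq_getElem hn0
          rw [hx2] at hlow
          rw [hAB, hq0] at hlow
          simp only [List.take_zero, List.drop_zero, List.nil_append] at hlow
          rw [lines_at fc a.toNat (la + 1) 2 (by omega)] at hlow
          exact ne_adamLine_of_not_startswith _ _ (hnp _ (List.getElem_mem hn0))
            (Option.some.inj hlow.symm)


-- ===== VERDICT (by name: the statement is the Claim_ definition above) =====
theorem add_adam_requirements_spec : Claim_unchanged_add_adam_requirements := by
  intro c a fc li la _ hPre hnD
  by_cases hq : li ≤ -2 ∧ 2 ≤ a
  · have hcor : a = 2 ∧ (fc.length : Int) + li = -2 ∧ li ≤ -3 := by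
      by_contra hc
      exact hnD ⟨hq.1, hq.2, hc⟩
    obtain ⟨ha2, hm, hli3⟩ := hcor
    subst ha2
    exact agree_case c fc li la hli3 hm
  · exact main_equiv c a fc li la hq

theorem add_adam_requirements_changed : Claim_changed_add_adam_requirements := by
  unfold Claim_changed_add_adam_requirements; decide

theorem add_adam_requirements_tight : Claim_exact_add_adam_requirements := by
  intro c a fc li la _ hPre hD
  obtain ⟨h1, h2, h3⟩ := hD
  exact tight_main c a fc li la h1 h2 h3 (hPre ⟨h1, h2⟩)
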